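-- pv_equiv track=rewrite | github.com/Eugleo/vlmrm | src/vlmrm/envs/box2d/keyboard_input_core.py | parse_qsteps
-- ===== SOURCE A (Python) =====
-- def parse_qsteps(stepstr):
--     """Parse a string of 'wasd ' steps formatted like '10wd5a2 2s' into a list of steps"""
--     if len(stepstr) == 1:
--         return [stepstr]
--     stepl = list(stepstr)[::-1]
--     steps = []
--     while stepl:
--         num = ""
--         while stepl and stepl[-1].isdigit():
--             num += stepl.pop()
--         if num == "":
--             num = "0"
--         if not stepl:  # ends in a number with no following step
--             return steps
--         st = ""
--         while stepl and not stepl[-1].isdigit():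
--             st += stepl.pop()
--         steps.extend([st] * int(num))
--     return steps
-- ===== SOURCE B (Python) =====
-- def parse_qsteps(stepstr):
--     """Parse a string of 'wasd ' steps formatted like '10wd5a2 2s' into a list of steps"""
--     if len(stepstr) == 1:
--         return [stepstr]
--     # tokenize into maximal runs of same digit-ness, then fold the runs
--     runs = []
--     for ch in stepstr:
--         if runs and runs[-1][0].isdigit() == ch.isdigit():
--             runs[-1] += ch
--         else:
--             runs.append(ch)
--     steps = []
--     count = "0"
--     for run in runs:
--         if run[0].isdigit():
--             count = run
--         else:
--             steps.extend([run] * int(count))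
--             count = "0"
--     return steps
-- ===== Notes on version B (the rewrite author's own statement) =====
-- stated objective: simpler
-- what changed: B tokenizes the string front-to-back into maximal digit/non-digit runs in one pass and then folds the runs with a pending-count variable, instead of A's reversed character list consumed by pop() inside nested while loops.
import Mathlib
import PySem

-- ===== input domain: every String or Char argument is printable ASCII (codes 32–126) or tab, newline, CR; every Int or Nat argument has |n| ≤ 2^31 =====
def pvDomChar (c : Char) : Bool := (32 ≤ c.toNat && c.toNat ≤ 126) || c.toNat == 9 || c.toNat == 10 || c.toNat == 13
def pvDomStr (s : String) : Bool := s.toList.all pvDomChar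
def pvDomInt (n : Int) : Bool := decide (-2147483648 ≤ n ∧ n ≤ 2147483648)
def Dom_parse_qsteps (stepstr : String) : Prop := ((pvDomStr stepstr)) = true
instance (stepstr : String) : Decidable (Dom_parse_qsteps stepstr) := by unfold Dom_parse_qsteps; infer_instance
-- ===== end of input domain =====

-- B re-implements the run-length step parser by tokenizing the string into maximal
-- digit/non-digit runs first and then folding the runs, instead of A's pop-driven
-- nested while loops over a reversed character list (objective: simpler decomposition).

-- int(num) where num is "0" or a nonempty run of ASCII digits (int() never raises here)
def pyIntDigits (cs : List Char) : Int := (PySem.Int.ofChars? cs).getD 0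

-- ===== PORT A =====
-- inner 'while stepl and <p>(stepl[-1]): acc += stepl.pop()' (stepl[-1] = getLast, pop = dropLast)
def aTake (p : Char → Bool) (l : List Char) (acc : List Char) : List Char × List Char :=
  if hl : l = [] then (acc, l)
  else
    let c := l.getLast hl
    if p c then aTake p l.dropLast (acc ++ [c]) else (acc, l)
termination_by l.length
decreasing_by cases l with | nil => exact absurd rfl hl | cons a t => simp

theorem aTake_len (p : Char → Bool) (l acc : List Char) :
    (aTake p l acc).2.length ≤ l.length := by
  fun_induction aTake p l acc with
  | case1 => simp
  | case2 l acc hl c hp ih =>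
      calc (aTake p l.dropLast (acc ++ [c])).2.length ≤ l.dropLast.length := ih
        _ ≤ l.length := by simp [List.length_dropLast]
  | case3 l acc hl c hp => simp

theorem aTake_last (p : Char → Bool) (l acc : List Char) :
    ∀ c, (aTake p l acc).2.getLast? = some c → p c = false := by
  fun_induction aTake p l acc with
  | case1 acc => simp
  | case2 l acc hl c hp ih => exact ih
  | case3 l acc hl c hp =>
      intro d hd
      simp only at hd
      rw [List.getLast?_eq_some_getLast hl] at hd
      cases hd; simpa using hp

theorem aTake_lt (p : Char → Bool) (l acc : List Char) (hne : l ≠ [])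
    (hl : ∀ c, l.getLast? = some c → p c = true) :
    (aTake p l acc).2.length < l.length := by
  rw [aTake, dif_neg hne]
  have hc : p (l.getLast hne) = true := hl _ (List.getLast?_eq_some_getLast hne)
  simp only [hc, if_true]
  calc (aTake p l.dropLast (acc ++ [l.getLast hne])).2.length ≤ l.dropLast.length :=
        aTake_len _ _ _
    _ < l.length := by cases l with | nil => exact absurd rfl hne | cons a t => simp

-- outer 'while stepl:' loop of A
def aLoop (stepl : List Char) (steps : List String) : List String :=
  if stepl = [] then steps
  else
    let r1 := aTake PySem.Chars.isdigit stepl []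
    let num := if r1.1 = [] then ['0'] else r1.1
    if h2 : r1.2 = [] then steps
    else
      let r2 := aTake (fun c => !PySem.Chars.isdigit c) r1.2 []
      aLoop r2.2 (steps ++ List.replicate (pyIntDigits num).toNat (String.mk r2.1))
termination_by stepl.length
decreasing_by
  have h1 : (aTake PySem.Chars.isdigit stepl []).2.length ≤ stepl.length := aTake_len _ _ _
  have h3 : (aTake (fun c => !PySem.Chars.isdigit c) (aTake PySem.Chars.isdigit stepl []).2 []).2.length
      < (aTake PySem.Chars.isdigit stepl []).2.length := by
    apply aTake_lt _ _ _ h2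
    intro c hc
    have := aTake_last PySem.Chars.isdigit stepl [] c hc
    simp [this]
  omega

def parse_qsteps (stepstr : String) : List String :=
  if PySem.Str.len stepstr = 1 then [stepstr]
  else aLoop stepstr.toList.reverse []   -- stepl = list(stepstr)[::-1]; steps = []

-- ===== PORT B =====
-- one pass building the list of maximal same-digitness runs (runs[-1] += ch / runs.append(ch))
def bStep (runs : List (List Char)) (ch : Char) : List (List Char) :=
  match runs.getLast? with
  | some lastRun =>
      if (PySem.List.pyGet? lastRun 0).map PySem.Chars.isdigit = some (PySem.Chars.isdigit ch) then
        runs.dropLast ++ [lastRun ++ [ch]]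
      else runs ++ [[ch]]
  | none => runs ++ [[ch]]

-- body of B's second loop over the runs, state = (steps, count)
def bFoldStep (acc : List String × List Char) (run : List Char) : List String × List Char :=
  if (PySem.List.pyGet? run 0).map PySem.Chars.isdigit = some true then (acc.1, run)
  else (acc.1 ++ List.replicate (pyIntDigits acc.2).toNat (String.mk run), ['0'])

def parse_qsteps_alt (stepstr : String) : List String :=
  if PySem.Str.len stepstr = 1 then [stepstr]
  else ((stepstr.toList.foldl bStep []).foldl bFoldStep ([], ['0'])).1

-- ===== PRECONDITION & SPEC =====
def Spec_parse_qsteps (stepstr : String) (out : List String) : Prop := out = parse_qsteps_alt stepstr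
instance (stepstr : String) (out : List String) : Decidable (Spec_parse_qsteps stepstr out) := by unfold Spec_parse_qsteps; infer_instance

-- ===== CLAIM (what is proved, stated in full; the proofs are below) =====
def Claim_equal_parse_qsteps : Prop := ∀ (stepstr : String), Dom_parse_qsteps stepstr → Spec_parse_qsteps stepstr (parse_qsteps stepstr)

-- ===== LEMMAS AND PROOFS =====

theorem pvDropWhile_not_lt (p : Char → Bool) (l : List Char) (hne : l.dropWhile p ≠ []) :
    ((l.dropWhile p).dropWhile (fun x => !p x)).length < (l.dropWhile p).length := by
  cases h : l.dropWhile p with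
  | nil => exact absurd h hne
  | cons d u =>
      have hd : p d = false := by
        have := List.head?_dropWhile_not p l
        rw [h] at this; simpa using this
      rw [List.dropWhile_cons_of_pos (by simp [hd])]
      calc (u.dropWhile (fun x => !p x)).length ≤ u.length := u.length_dropWhile_le _
        _ < (d :: u).length := by simp

-- canonical front-to-back characterisation of the parse, shared by both directions
def pvP (cs : List Char) : List String :=
  if cs = [] then []
  else
    let num := cs.takeWhile PySem.Chars.isdigit
    let rest := cs.dropWhile PySem.Chars.isdigit
    if h2 : rest = [] then []
    else
      let st := rest.takeWhile (fun x => !PySem.Chars.isdigit x)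
      let rest2 := rest.dropWhile (fun x => !PySem.Chars.isdigit x)
      List.replicate (pyIntDigits (if num = [] then ['0'] else num)).toNat (String.mk st) ++ pvP rest2
termination_by cs.length
decreasing_by
  have hle : (cs.dropWhile PySem.Chars.isdigit).length ≤ cs.length := cs.length_dropWhile_le _
  have hlt := pvDropWhile_not_lt PySem.Chars.isdigit cs h2
  omega

theorem aTake_reverse (p : Char → Bool) (cs acc : List Char) :
    aTake p cs.reverse acc = (acc ++ cs.takeWhile p, (cs.dropWhile p).reverse) := by
  induction cs generalizing acc with
  | nil => rw [aTake]; simp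
  | cons c t ih =>
      rw [aTake, dif_neg (by simp : ¬(c :: t).reverse = [])]
      by_cases hp : p c
      · simp only [List.reverse_cons, List.dropLast_concat]
        rw [if_pos (by simpa using hp), ih]
        simp [hp]
      · have hpf : p c = false := by simpa using hp
        simp only [List.reverse_cons]
        rw [if_neg (by simp [hpf])]
        simp [hpf]

theorem aLoop_reverse (cs : List Char) (steps : List String) :
    aLoop cs.reverse steps = steps ++ pvP cs := by
  induction hn : cs.length using Nat.strong_induction_on generalizing cs steps with
  | _ n ih =>
  subst hn
  rw [aLoop, pvP]
  by_cases h0 : cs = []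
  · simp [h0]
  · rw [if_neg (by simpa using h0), if_neg h0]
    simp only [aTake_reverse, List.nil_append]
    by_cases h2 : cs.dropWhile PySem.Chars.isdigit = []
    · rw [dif_pos (by simp [h2]), dif_pos h2]; simp
    · rw [dif_neg (by simpa using h2), dif_neg h2]
      have hlen : ((cs.dropWhile PySem.Chars.isdigit).dropWhile
          (fun x => !PySem.Chars.isdigit x)).length < cs.length := by
        have hle : (cs.dropWhile PySem.Chars.isdigit).length ≤ cs.length :=
          cs.length_dropWhile_le _
        have hlt := pvDropWhile_not_lt PySem.Chars.isdigit cs h2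
        omega
      rw [ih _ hlen _ _ rfl]
      simp

-- maximal-run grouping spec for B's first loop
def pvG (k : Bool) (r : List Char) : List Char → List (List Char)
  | [] => [r]
  | c :: t =>
      if PySem.Chars.isdigit c == k then pvG k (r ++ [c]) t
      else r :: pvG (PySem.Chars.isdigit c) [c] t

def pvGroups : List Char → List (List Char)
  | [] => []
  | c :: t => pvG (PySem.Chars.isdigit c) [c] t

theorem foldl_bStep_concat (cs : List Char) (runs : List (List Char)) (r : List Char) (k : Bool)
    (hr : r ≠ []) (hk : r.head?.map PySem.Chars.isdigit = some k) :
    cs.foldl bStep (runs ++ [r]) = runs ++ pvG k r cs := by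
  induction cs generalizing runs r k with
  | nil => simp [pvG]
  | cons c t ih =>
      have hget : PySem.List.pyGet? r 0 = r.head? := by
        cases r with
        | nil => exact absurd rfl hr
        | cons a u => exact PySem.List.pyGet?_zero_cons a u
      rw [List.foldl_cons, pvG]
      by_cases hc : PySem.Chars.isdigit c = k
      · have hb : bStep (runs ++ [r]) c = runs ++ [r ++ [c]] := by
          unfold bStep
          simp only [List.getLast?_concat, hget, hk]
          rw [if_pos (by rw [hc]), List.dropLast_concat]
        rw [hb, if_pos (by simp [hc])]
        exact ih runs (r ++ [c]) k (by simp)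
          (by cases r with
              | nil => exact absurd rfl hr
              | cons a u => simpa using hk)
      · have hb : bStep (runs ++ [r]) c = (runs ++ [r]) ++ [[c]] := by
          unfold bStep
          simp only [List.getLast?_concat, hget, hk]
          rw [if_neg (by simp only [Option.some.injEq]; exact fun h => hc h.symm)]
        rw [hb, if_neg (by simp [hc])]
        rw [ih (runs ++ [r]) [c] (PySem.Chars.isdigit c) (by simp) (by simp)]
        simp

theorem foldl_bStep_nil (cs : List Char) : cs.foldl bStep [] = pvGroups cs := by
  cases cs with
  | nil => rfl
  | cons c t =>
      rw [List.foldl_cons, show bStep [] c = [] ++ [[c]] from rfl,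
        foldl_bStep_concat t [] [c] (PySem.Chars.isdigit c) (by simp) (by simp)]
      rfl

theorem pvG_span (cs : List Char) (k : Bool) (r : List Char) :
    pvG k r cs = (r ++ cs.takeWhile (fun c => PySem.Chars.isdigit c == k))
      :: pvGroups (cs.dropWhile (fun c => PySem.Chars.isdigit c == k)) := by
  induction cs generalizing r with
  | nil => simp [pvG, pvGroups]
  | cons c t ih =>
      rw [pvG]
      by_cases hc : (PySem.Chars.isdigit c == k) = true
      · rw [if_pos hc, ih]
        simp [List.takeWhile_cons, List.dropWhile_cons, hc]
      · rw [if_neg hc]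
        have hcf : (PySem.Chars.isdigit c == k) = false := by simpa using hc
        simp [List.takeWhile_cons, List.dropWhile_cons, hcf, pvGroups]

theorem pvPred_false : (fun c => PySem.Chars.isdigit c == false) = (fun x => !PySem.Chars.isdigit x) := by
  funext c; cases PySem.Chars.isdigit c <;> rfl

theorem pvPred_true : (fun c => PySem.Chars.isdigit c == true) = PySem.Chars.isdigit := by
  funext c; cases PySem.Chars.isdigit c <;> rfl

theorem foldl_bFold (cs : List Char) (steps : List String) :
    ((pvGroups cs).foldl bFoldStep (steps, ['0'])).1 = steps ++ pvP cs := by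
  induction hn : cs.length using Nat.strong_induction_on generalizing cs steps with
  | _ n ih =>
  subst hn
  cases cs with
  | nil => simp [pvGroups, pvP]
  | cons c t =>
  rw [pvP, if_neg (by simp)]
  by_cases hd : PySem.Chars.isdigit c = true
  · -- leading digit run
    have hgr : pvGroups (c :: t) = (c :: t.takeWhile PySem.Chars.isdigit)
        :: pvGroups (t.dropWhile PySem.Chars.isdigit) := by
      rw [pvGroups, hd, pvG_span, pvPred_true]
      simp
    have hstep1 : bFoldStep (steps, ['0']) (c :: t.takeWhile PySem.Chars.isdigit)
        = (steps, c :: t.takeWhile PySem.Chars.isdigit) := by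
      unfold bFoldStep
      rw [if_pos (by rw [PySem.List.pyGet?_zero_cons]; simp [hd])]
    rw [hgr, List.foldl_cons, hstep1,
      List.takeWhile_cons_of_pos hd, List.dropWhile_cons_of_pos hd]
    cases hrest : t.dropWhile PySem.Chars.isdigit with
    | nil => simp [pvGroups]
    | cons d u =>
      have hd2 : PySem.Chars.isdigit d = false := by
        have := List.head?_dropWhile_not PySem.Chars.isdigit t
        rw [hrest] at this; simpa using this
      have hgr2 : pvGroups (d :: u) = (d :: u.takeWhile (fun x => !PySem.Chars.isdigit x))
          :: pvGroups (u.dropWhile (fun x => !PySem.Chars.isdigit x)) := by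
        rw [pvGroups, hd2, pvG_span, pvPred_false]
        simp
      have hstep2 : bFoldStep (steps, c :: t.takeWhile PySem.Chars.isdigit)
          (d :: u.takeWhile (fun x => !PySem.Chars.isdigit x))
          = (steps ++ List.replicate (pyIntDigits (c :: t.takeWhile PySem.Chars.isdigit)).toNat
              (String.mk (d :: u.takeWhile (fun x => !PySem.Chars.isdigit x))), ['0']) := by
        unfold bFoldStep
        rw [if_neg (by rw [PySem.List.pyGet?_zero_cons]; simp [hd2])]
      have hlen : (u.dropWhile (fun x => !PySem.Chars.isdigit x)).length < (c :: t).length := by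
        have h1 : (d :: u).length ≤ t.length := by
          rw [← hrest]; exact t.length_dropWhile_le _
        have h2 : (u.dropWhile (fun x => !PySem.Chars.isdigit x)).length ≤ u.length :=
          u.length_dropWhile_le _
        simp at h1 ⊢; omega
      rw [hgr2, List.foldl_cons, hstep2, ih _ hlen _ _ rfl]
      simp [List.takeWhile_cons, List.dropWhile_cons, hd2]
  · -- leading non-digit run
    have hdf : PySem.Chars.isdigit c = false := by simpa using hd
    have hgr : pvGroups (c :: t) = (c :: t.takeWhile (fun x => !PySem.Chars.isdigit x))
        :: pvGroups (t.dropWhile (fun x => !PySem.Chars.isdigit x)) := by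
      rw [pvGroups, hdf, pvG_span, pvPred_false]
      simp
    have hstep1 : bFoldStep (steps, ['0']) (c :: t.takeWhile (fun x => !PySem.Chars.isdigit x))
        = (steps ++ List.replicate (pyIntDigits ['0']).toNat
            (String.mk (c :: t.takeWhile (fun x => !PySem.Chars.isdigit x))), ['0']) := by
      unfold bFoldStep
      rw [if_neg (by rw [PySem.List.pyGet?_zero_cons]; simp [hdf])]
    have hlen : (t.dropWhile (fun x => !PySem.Chars.isdigit x)).length < (c :: t).length := by
      have := t.length_dropWhile_le (fun x => !PySem.Chars.isdigit x)
      simp; omega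
    rw [hgr, List.foldl_cons, hstep1, ih _ hlen _ _ rfl]
    rw [List.takeWhile_cons_of_neg (by simp [hdf]), List.dropWhile_cons_of_neg (by simp [hdf])]
    rw [dif_neg (by simp)]
    simp [List.takeWhile_cons, List.dropWhile_cons, hdf]

-- ===== VERDICT (by name: the statement is the Claim_ definition above) =====
theorem parse_qsteps_spec : Claim_equal_parse_qsteps := by
  intro s _
  unfold Spec_parse_qsteps parse_qsteps parse_qsteps_alt
  by_cases h : PySem.Str.len s = 1
  · rw [if_pos h, if_pos h]
  · rw [if_neg h, if_neg h, foldl_bStep_nil, foldl_bFold, aLoop_reverse]
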